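-- pv_equiv track=rewrite | github.com/V-You/readme-doc-healer | scripts/build_best_openapi.py | repeated_field_names
-- ===== SOURCE A (Python) =====
-- from typing import Any
--
-- def repeated_field_names(fields: list[dict[str, Any]]) -> list[str]:
--     seen: set[str] = set()
--     repeated: set[str] = set()
--     for field in fields:
--         name = field.get("key")
--         if not name:
--             continue
--         if name in seen:
--             repeated.add(name)
--         seen.add(name)
--     return sorted(repeated)
-- ===== SOURCE B (Python) =====
-- def repeated_field_names(fields: list[dict[str, str]]) -> list[str]:
--     names = sorted(n for f in fields for n in [f.get("key")] if n)
--     out: list[str] = []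
--     for prev, cur in zip(names, names[1:]):
--         if prev == cur and (not out or out[-1] != cur):
--             out.append(cur)
--     return out
-- ===== Notes on version B (the rewrite author's own statement) =====
-- stated objective: alternative
-- what changed: Sort the valid key names first, then find duplicates by a single adjacent-pair scan (ns[i]==ns[i-1], deduplicating against the last output) instead of tracking seen/repeated sets and sorting a set at the end.
import Mathlib
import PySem

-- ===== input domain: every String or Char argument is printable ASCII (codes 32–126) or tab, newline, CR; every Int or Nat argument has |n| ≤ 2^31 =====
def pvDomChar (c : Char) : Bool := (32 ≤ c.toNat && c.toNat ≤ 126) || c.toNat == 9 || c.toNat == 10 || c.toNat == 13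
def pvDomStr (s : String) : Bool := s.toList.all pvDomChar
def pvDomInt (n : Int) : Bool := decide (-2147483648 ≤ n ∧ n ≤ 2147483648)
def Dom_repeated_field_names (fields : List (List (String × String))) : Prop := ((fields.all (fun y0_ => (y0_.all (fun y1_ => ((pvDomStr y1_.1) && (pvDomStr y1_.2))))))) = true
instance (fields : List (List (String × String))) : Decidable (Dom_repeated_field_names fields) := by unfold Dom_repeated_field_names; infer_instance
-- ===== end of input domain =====

-- B sorts the valid key names first and finds duplicates by one adjacent-pair scan (deduplicating
-- against the last output element), instead of A's seen/repeated set bookkeeping — objective: alternative, same cost.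
-- ===== PORT A =====
def repeated_field_names (fields : List (List (String × String))) : List String :=
  PySem.List.sorted
    (fields.foldl
      (fun (sr : PySem.Set String × PySem.Set String) field =>
        match (PySem.Dict.mk field).get? "key" with
        | none => sr
        | some name =>
          if name = "" then sr
          else (PySem.Set.add sr.1 name,
                if PySem.Set.contains sr.1 name then PySem.Set.add sr.2 name else sr.2))
      (PySem.Set.empty, PySem.Set.empty)).2
    (fun x => x) false

-- ===== PORT B =====
def repeated_field_names_alt (fields : List (List (String × String))) : List String :=
  let names := PySem.List.sorted
    (fields.filterMap (fun f =>
      match (PySem.Dict.mk f).get? "key" with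
      | none => none
      | some n => if n = "" then none else some n))
    (fun x => x) false
  (names.zip (names.drop 1)).foldl
    (fun (out : List String) pc =>
      if pc.1 = pc.2 ∧ (out = [] ∨ out.getLast? ≠ some pc.2) then out ++ [pc.2] else out)
    []

-- ===== PRECONDITION & SPEC =====
def Spec_repeated_field_names (fields : List (List (String × String))) (out : List String) : Prop := out = repeated_field_names_alt fields
instance (fields : List (List (String × String))) (out : List String) : Decidable (Spec_repeated_field_names fields out) := by unfold Spec_repeated_field_names; infer_instance

-- ===== CLAIM (what is proved, stated in full; the proofs are below) =====
def Claim_equal_repeated_field_names : Prop := ∀ (fields : List (List (String × String))), Dom_repeated_field_names fields → Spec_repeated_field_names fields (repeated_field_names fields)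

-- ===== LEMMAS AND PROOFS =====

/-- The effective (non-skipped) name of a field: its "key" entry, unless missing or empty. -/
def pvGetName (field : List (String × String)) : Option String :=
  match (PySem.Dict.mk field).get? "key" with
  | none => none
  | some n => if n = "" then none else some n

/-- The sequence of effective names, in order. -/
def pvNames (fields : List (List (String × String))) : List String :=
  fields.filterMap pvGetName

/-- A's loop skips fields with a missing/empty "key": its fold over fields is a fold over `pvNames`. -/
theorem pv_fold_skip {S : Type} (f : S → String → S) (fields : List (List (String × String))) :
    ∀ (init : S),
      fields.foldl
        (fun s field =>
          match (PySem.Dict.mk field).get? "key" with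
          | none => s
          | some name => if name = "" then s else f s name) init
      = (pvNames fields).foldl f init := by
  induction fields with
  | nil => intro init; rfl
  | cons fd t ih =>
    intro init
    simp only [List.foldl_cons, pvNames, List.filterMap_cons]
    cases h : (PySem.Dict.mk fd).get? "key" with
    | none => simp [pvGetName, h, ih, pvNames]
    | some n =>
      by_cases hn : n = "" <;> simp [pvGetName, h, hn, ih, pvNames]

/-- `pv_fold_skip` at A's loop body. -/
theorem pv_foldA_eq (fields : List (List (String × String)))
    (init : PySem.Set String × PySem.Set String) :
    fields.foldl
      (fun (sr : PySem.Set String × PySem.Set String) field =>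
        match (PySem.Dict.mk field).get? "key" with
        | none => sr
        | some name =>
          if name = "" then sr
          else (PySem.Set.add sr.1 name,
                if PySem.Set.contains sr.1 name then PySem.Set.add sr.2 name else sr.2)) init
    = (pvNames fields).foldl
        (fun sr n =>
          (PySem.Set.add sr.1 n,
           if PySem.Set.contains sr.1 n then PySem.Set.add sr.2 n else sr.2)) init :=
  pv_fold_skip _ fields init

/-- Invariant of A's loop over the name sequence: `repeated` stays duplicate-free and holds
exactly the names already in it, already seen, or occurring at least twice in the names ahead. -/
theorem pv_foldN_spec (ns : List String) :
    ∀ (seen rep : PySem.Set String), rep.Nodup →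
      (ns.foldl
        (fun (sr : PySem.Set String × PySem.Set String) n =>
          (PySem.Set.add sr.1 n,
           if PySem.Set.contains sr.1 n then PySem.Set.add sr.2 n else sr.2)) (seen, rep)).2.Nodup ∧
      ∀ x, x ∈ (ns.foldl
        (fun (sr : PySem.Set String × PySem.Set String) n =>
          (PySem.Set.add sr.1 n,
           if PySem.Set.contains sr.1 n then PySem.Set.add sr.2 n else sr.2)) (seen, rep)).2
        ↔ x ∈ rep ∨ (x ∈ ns ∧ (x ∈ seen ∨ 2 ≤ ns.count x)) := by
  induction ns with
  | nil => exact fun seen rep hrep => ⟨hrep, fun x => by simp⟩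
  | cons n t ih =>
    intro seen rep hrep
    simp only [List.foldl_cons]
    have hrep' : (if PySem.Set.contains seen n then PySem.Set.add rep n else rep).Nodup := by
      split
      · exact PySem.Set.nodup_add rep n hrep
      · exact hrep
    obtain ⟨hnd, hmem⟩ := ih (PySem.Set.add seen n)
      (if PySem.Set.contains seen n then PySem.Set.add rep n else rep) hrep'
    refine ⟨hnd, fun x => ?_⟩
    rw [hmem x]
    by_cases hx : x = n
    · subst hx
      have hcount : (x :: t).count x = t.count x + 1 := by simp
      by_cases hs : x ∈ seen
      · have hc : PySem.Set.contains seen x = true := (PySem.Set.contains_iff seen x).mpr hs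
        rw [if_pos hc]
        constructor
        · intro _; exact Or.inr ⟨List.mem_cons_self, Or.inl hs⟩
        · intro _; exact Or.inl ((PySem.Set.mem_add rep x x).mpr (Or.inr rfl))
      · have hc : PySem.Set.contains seen x = false := by
          rcases Bool.eq_false_or_eq_true (PySem.Set.contains seen x) with h | h
          · exact absurd ((PySem.Set.contains_iff seen x).mp h) hs
          · exact h
        rw [if_neg (by rw [hc]; exact Bool.false_ne_true)]
        have hmt : x ∈ t ↔ 1 ≤ t.count x :=
          ⟨fun h => List.count_pos_iff.mpr h, fun h => List.count_pos_iff.mp h⟩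
        constructor
        · rintro (hr | ⟨ht, _⟩)
          · exact Or.inl hr
          · exact Or.inr ⟨List.mem_cons_self, Or.inr (by have := hmt.mp ht; omega)⟩
        · rintro (hr | ⟨_, (hs' | hc2)⟩)
          · exact Or.inl hr
          · exact absurd hs' hs
          · refine Or.inr ⟨hmt.mpr (by rw [hcount] at hc2; omega),
              Or.inl ((PySem.Set.mem_add seen x x).mpr (Or.inr rfl))⟩
    · have hcount : (n :: t).count x = t.count x := by simp [Ne.symm hx]
      have hmem_rep' :
          x ∈ (if PySem.Set.contains seen n then PySem.Set.add rep n else rep) ↔ x ∈ rep := by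
        split
        · rw [PySem.Set.mem_add]; simp [hx]
        · exact Iff.rfl
      have hmem_seen' : x ∈ PySem.Set.add seen n ↔ x ∈ seen := by
        rw [PySem.Set.mem_add]; simp [hx]
      rw [hmem_rep', hmem_seen', hcount]
      simp only [List.mem_cons, hx, false_or]

/-- In a `≤`-nondecreasing list, every element is at most the last one. -/
theorem pv_le_getLast (l : List String) (h : l.Pairwise (· ≤ ·)) :
    ∀ y ∈ l, ∃ z, l.getLast? = some z ∧ y ≤ z := by
  induction l with
  | nil => simp
  | cons a t ih =>
    intro y hy
    cases t with
    | nil => simp at hy; exact ⟨a, by simp [hy]⟩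
    | cons b t' =>
      have hpt : (b :: t').Pairwise (· ≤ ·) := (List.pairwise_cons.mp h).2
      rcases List.mem_cons.mp hy with rfl | hyt
      · obtain ⟨z, hz, hbz⟩ := ih hpt b List.mem_cons_self
        exact ⟨z, by simpa using hz, le_trans ((List.pairwise_cons.mp h).1 b List.mem_cons_self) hbz⟩
      · obtain ⟨z, hz, hyz⟩ := ih hpt y hyt
        exact ⟨z, by simpa using hz, hyz⟩

/-- B's adjacent-pair scan over a sorted name list: the result is strictly increasing and holds
exactly the accumulator's elements plus the names occurring at least twice. -/
theorem pv_scan_spec (ns : List String) :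
    ∀ (out : List String), ns.Pairwise (· ≤ ·) → out.Pairwise (· < ·) →
      (∀ y ∈ out, ∀ x ∈ ns, y ≤ x) →
      ((ns.zip (ns.drop 1)).foldl
        (fun (o : List String) pc =>
          if pc.1 = pc.2 ∧ (o = [] ∨ o.getLast? ≠ some pc.2) then o ++ [pc.2] else o) out).Pairwise (· < ·) ∧
      ∀ x, x ∈ (ns.zip (ns.drop 1)).foldl
          (fun (o : List String) pc =>
            if pc.1 = pc.2 ∧ (o = [] ∨ o.getLast? ≠ some pc.2) then o ++ [pc.2] else o) out
        ↔ x ∈ out ∨ 2 ≤ ns.count x := by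
  induction ns with
  | nil =>
    intro out _ hout _
    refine ⟨by simpa using hout, fun x => by simp⟩
  | cons a t ih =>
    intro out hns hout hle
    cases t with
    | nil =>
      refine ⟨by simpa using hout, fun x => ?_⟩
      have hc1 : (([a] : List String).count x ≤ 1) :=
        le_trans (List.count_le_length) (by simp)
      simp only [List.zip, List.drop_one, List.tail_cons, List.zipWith_nil_right, List.foldl_nil]
      constructor
      · exact Or.inl
      · rintro (h | h)
        · exact h
        · exact absurd h (by omega)
    | cons b t' =>
      have hab : a ≤ b := (List.pairwise_cons.mp hns).1 b List.mem_cons_self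
      have hnt : (b :: t').Pairwise (· ≤ ·) := (List.pairwise_cons.mp hns).2
      have hbt : ∀ x ∈ t', b ≤ x := (List.pairwise_cons.mp hnt).1
      have hzip : ((a :: b :: t').zip ((a :: b :: t').drop 1))
          = (a, b) :: ((b :: t').zip ((b :: t').drop 1)) := by
        simp [List.zip]
      rw [hzip, List.foldl_cons]
      by_cases hcond : a = b ∧ (out = [] ∨ out.getLast? ≠ some b)
      · rw [if_pos hcond]
        obtain ⟨rfl, hlast⟩ := hcond
        -- here a = b (b has been substituted by a); every element of out is strictly below a
        have houtb : ∀ y ∈ out, y < a := by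
          intro y hy
          obtain ⟨z, hz, hyz⟩ := pv_le_getLast out (hout.imp le_of_lt) y hy
          have hzb : z ≤ a := by
            have hzmem : z ∈ out := List.mem_of_getLast? hz
            exact hle z hzmem a List.mem_cons_self
          rcases hlast with h0 | hne
          · subst h0; simp at hy
          · have hzne : z ≠ a := fun h => hne (h ▸ hz)
            exact lt_of_le_of_lt hyz (lt_of_le_of_ne hzb hzne)
        have hout' : (out ++ [a]).Pairwise (· < ·) := by
          rw [List.pairwise_append]
          exact ⟨hout, List.pairwise_singleton _ _, fun y hy z hz => by
            simp at hz; subst hz; exact houtb y hy⟩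
        have hle' : ∀ y ∈ out ++ [a], ∀ x ∈ (a :: t'), y ≤ x := by
          intro y hy x hx
          rcases List.mem_append.mp hy with hy | hy
          · exact hle y hy x (List.mem_cons_of_mem a hx)
          · simp at hy; subst hy
            rcases List.mem_cons.mp hx with rfl | hx
            · exact le_refl _
            · exact hbt x hx
        obtain ⟨hnd, hmem⟩ := ih (out ++ [a]) hnt hout' hle'
        refine ⟨hnd, fun x => ?_⟩
        rw [hmem x]
        by_cases hx : x = a
        · subst hx
          simp [List.count_cons_self]
        · have h1 : (a :: a :: t').count x = (a :: t').count x :=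
            List.count_cons_of_ne (fun h => hx h.symm)
          rw [h1]
          constructor
          · rintro (hy | hc)
            · rcases List.mem_append.mp hy with hy | hy
              · exact Or.inl hy
              · simp at hy; exact absurd hy hx
            · exact Or.inr hc
          · rintro (hy | hc)
            · exact Or.inl (List.mem_append.mpr (Or.inl hy))
            · exact Or.inr hc
      · rw [if_neg hcond]
        have hle' : ∀ y ∈ out, ∀ x ∈ (b :: t'), y ≤ x :=
          fun y hy x hx => hle y hy x (List.mem_cons_of_mem a hx)
        obtain ⟨hnd, hmem⟩ := ih out hnt hout hle'
        refine ⟨hnd, fun x => ?_⟩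
        rw [hmem x]
        by_cases hab' : a = b
        · -- condition failed because out is nonempty with last element b: b is already in out
          subst hab'
          rw [not_and_or, not_or] at hcond
          rcases hcond with h | ⟨hne, hlast⟩
          · exact absurd rfl h
          rw [not_ne_iff] at hlast
          have hbmem : a ∈ out := List.mem_of_getLast? hlast
          by_cases hx : x = a
          · subst hx; simp [hbmem]
          · have hcn : (a :: a :: t').count x = (a :: t').count x :=
              List.count_cons_of_ne (fun h => hx h.symm)
            rw [hcn]
        · -- a < b, so a does not occur again; counts of every x agree where it matters
          have haltb : a < b := lt_of_le_of_ne hab hab'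
          by_cases hx : x = a
          · subst hx
            have hnot : x ∉ (b :: t') := by
              intro h
              rcases List.mem_cons.mp h with rfl | h
              · exact absurd rfl hab'
              · exact absurd rfl (ne_of_lt (lt_of_lt_of_le haltb (hbt x h)))
            have h0 : (b :: t').count x = 0 := List.count_eq_zero.mpr hnot
            have h1 : (x :: b :: t').count x = 1 := by
              rw [List.count_cons_self, h0]
            rw [h0, h1]
            simp
          · have hcn : (a :: b :: t').count x = (b :: t').count x :=
              List.count_cons_of_ne (fun h => hx h.symm)
            rw [hcn]

-- ===== VERDICT (by name: the statement is the Claim_ definition above) =====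
theorem repeated_field_names_spec : Claim_equal_repeated_field_names := by
  intro fields _
  unfold Spec_repeated_field_names repeated_field_names repeated_field_names_alt
  rw [pv_foldA_eq]
  obtain ⟨hnd, hmem⟩ :=
    pv_foldN_spec (pvNames fields) PySem.Set.empty PySem.Set.empty List.nodup_nil
  have hsorted : (PySem.List.sorted (pvNames fields) (fun x => x) false).Pairwise (· ≤ ·) := by
    simpa using PySem.List.sorted_pairwise (pvNames fields) (fun x => x)
  obtain ⟨hndB, hmemB⟩ :=
    pv_scan_spec (PySem.List.sorted (pvNames fields) (fun x => x) false) [] hsorted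
      (List.Pairwise.nil) (by simp)
  refine PySem.List.sorted_eq_of_perm_of_pairwise_lt _ _ _ ?_ (by simpa using hndB)
  refine (List.perm_ext_iff_of_nodup (hndB.imp ne_of_lt) hnd).mpr fun x => ?_
  rw [hmemB x, hmem x]
  have hperm : (PySem.List.sorted (pvNames fields) (fun x => x) false).Perm (pvNames fields) :=
    PySem.List.sorted_perm _ _ _
  rw [hperm.count_eq]
  have hcm : 2 ≤ (pvNames fields).count x → x ∈ pvNames fields := by
    intro h; exact List.count_pos_iff.mp (by omega)
  simp only [PySem.Set.empty]
  constructor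
  · rintro (h | h)
    · simp at h
    · exact Or.inr ⟨hcm h, Or.inr h⟩
  · rintro (h | ⟨_, (h | h)⟩)
    · simp at h
    · simp at h
    · exact Or.inr h
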